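-- pv_equiv track=rewrite | github.com/zachariahBinx/nv5_test | func.py | match_dict
-- ===== SOURCE A (Python) =====
-- def match_dict(d_near_rad, d_values):
--     myDict = {}
--     d_inverse = dict_inverse(d_values)
--     for k,v in d_near_rad.items():
--         for x,y in d_inverse.items():
--             if x==k:
--                 myDict.update({x:y})
--
--     return myDict
--
-- def dict_inverse(dictionary):
--     return {v: k for k, l in dictionary.items() for v in l}
-- ===== SOURCE B (Python) =====
-- def match_dict(d_near_rad, d_values):
--     inv = {}
--     for key, lst in d_values.items():
--         for v in lst:
--             inv[v] = key
--     return {k: inv[k] for k in d_near_rad if k in inv}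
-- ===== Notes on version B (the rewrite author's own statement) =====
-- stated objective: faster
-- what changed: Replaces the nested scan over the whole inverse dict for every d_near_rad key with a single O(1) dict lookup per key (inverse built in one explicit loop, result as a comprehension).
import Mathlib
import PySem

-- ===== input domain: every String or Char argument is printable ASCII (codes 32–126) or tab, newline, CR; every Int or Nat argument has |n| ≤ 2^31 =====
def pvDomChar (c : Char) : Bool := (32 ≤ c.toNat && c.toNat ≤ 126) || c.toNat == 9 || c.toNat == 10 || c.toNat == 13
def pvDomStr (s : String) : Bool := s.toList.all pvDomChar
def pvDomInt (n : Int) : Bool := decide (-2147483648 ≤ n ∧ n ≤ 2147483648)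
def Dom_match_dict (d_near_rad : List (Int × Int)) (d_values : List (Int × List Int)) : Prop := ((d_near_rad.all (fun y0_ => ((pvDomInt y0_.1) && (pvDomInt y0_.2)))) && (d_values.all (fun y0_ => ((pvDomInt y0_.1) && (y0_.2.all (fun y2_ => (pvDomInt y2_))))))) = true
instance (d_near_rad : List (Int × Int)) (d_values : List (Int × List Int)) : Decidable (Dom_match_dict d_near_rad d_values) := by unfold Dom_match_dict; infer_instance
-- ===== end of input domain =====

-- B replaces A's inner scan over the whole inverse dict (per d_near_rad key) by one dict lookup per key: asymptotically faster, same return value.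

-- ===== PORT A =====
-- dict_inverse(dictionary) = {v: k for k, l in dictionary.items() for v in l}
def dict_inverse (dictionary : PySem.Dict Int (List Int)) : PySem.Dict Int Int :=
  dictionary.items.foldl
    (fun acc kl => kl.2.foldl (fun acc v => acc.insert v kl.1) acc)
    PySem.Dict.empty

def match_dict (d_near_rad : List (Int × Int)) (d_values : List (Int × List Int)) : List (Int × Int) :=
  let dnr := PySem.Dict.ofList d_near_rad
  let d_inverse := dict_inverse (PySem.Dict.ofList d_values)
  (dnr.items.foldl
    (fun myDict kv =>
      d_inverse.items.foldl
        (fun myDict xy => if xy.1 == kv.1 then myDict.insert xy.1 xy.2 else myDict)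
        myDict)
    PySem.Dict.empty).items

-- ===== PORT B =====
def match_dict_alt (d_near_rad : List (Int × Int)) (d_values : List (Int × List Int)) : List (Int × Int) :=
  -- inv = {}; for key, lst in d_values.items(): for v in lst: inv[v] = key
  let inv : PySem.Dict Int Int :=
    (PySem.Dict.ofList d_values).items.foldl
      (fun acc kl => kl.2.foldl (fun acc v => acc.insert v kl.1) acc)
      PySem.Dict.empty
  -- {k: inv[k] for k in d_near_rad if k in inv}
  ((PySem.Dict.ofList d_near_rad).keys.foldl
    (fun res k =>
      match inv.get? k with
      | some y => res.insert k y
      | none => res)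
    PySem.Dict.empty).items

-- ===== PRECONDITION & SPEC =====
def Spec_match_dict (d_near_rad : List (Int × Int)) (d_values : List (Int × List Int)) (out : List (Int × Int)) : Prop := out = match_dict_alt d_near_rad d_values
instance (d_near_rad : List (Int × Int)) (d_values : List (Int × List Int)) (out : List (Int × Int)) : Decidable (Spec_match_dict d_near_rad d_values out) := by unfold Spec_match_dict; infer_instance

-- ===== CLAIM (what is proved, stated in full; the proofs are below) =====
def Claim_equal_match_dict : Prop := ∀ (d_near_rad : List (Int × Int)) (d_values : List (Int × List Int)), Dom_match_dict d_near_rad d_values → Spec_match_dict d_near_rad d_values (match_dict d_near_rad d_values)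

-- ===== LEMMAS AND PROOFS =====

-- a scan that matches no pair is the identity
theorem scan_no_match (k : Int) (l : List (Int × Int)) (acc : PySem.Dict Int Int)
    (h : ∀ p ∈ l, p.1 ≠ k) :
    l.foldl (fun a p => if p.1 == k then a.insert p.1 p.2 else a) acc = acc := by
  induction l generalizing acc with
  | nil => rfl
  | cons hd tl ih =>
    have hhd : hd.1 ≠ k := h hd (List.mem_cons_self ..)
    simp only [List.foldl_cons]
    rw [if_neg (by simpa using hhd)]
    exact ih acc (fun p hp => h p (List.mem_cons_of_mem _ hp))

-- A's inner equality scan over a dict with distinct keys equals one lookup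
theorem scan_eq_lookup (k : Int) (l : List (Int × Int)) (acc : PySem.Dict Int Int)
    (hnd : (l.map Prod.fst).Nodup) :
    l.foldl (fun a p => if p.1 == k then a.insert p.1 p.2 else a) acc
      = match (PySem.Dict.mk l).get? k with
        | some y => acc.insert k y
        | none => acc := by
  induction l generalizing acc with
  | nil => rfl
  | cons hd tl ih =>
    obtain ⟨a, b⟩ := hd
    simp only [List.map_cons, List.nodup_cons] at hnd
    rw [PySem.Dict.get?_mk_cons]
    by_cases hk : a = k
    · subst hk
      simp only [List.foldl_cons, beq_self_eq_true, if_true]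
      exact scan_no_match a tl _ (fun p hp hpk => hnd.1 (hpk ▸ List.mem_map_of_mem hp))
    · simp only [List.foldl_cons]
      rw [if_neg (by simpa using hk), if_neg (by simpa using hk)]
      exact ih acc hnd.2

-- the inverse dict has distinct keys
theorem nodup_keys_dict_inverse (d : PySem.Dict Int (List Int)) :
    (dict_inverse d).keys.Nodup := by
  unfold dict_inverse
  have aux : ∀ (l : List (Int × List Int)) (acc : PySem.Dict Int Int), acc.keys.Nodup →
      (l.foldl (fun acc kl => kl.2.foldl (fun acc v => acc.insert v kl.1) acc) acc).keys.Nodup := by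
    intro l
    induction l with
    | nil => exact fun acc h => h
    | cons hd tl ih =>
      intro acc h
      simp only [List.foldl_cons]
      exact ih _ (PySem.Dict.nodup_keys_foldl_insert hd.2 (fun _ _ => hd.1) acc h)
  exact aux d.items PySem.Dict.empty PySem.Dict.nodup_keys_empty

theorem match_dict_eq_alt (d_near_rad : List (Int × Int)) (d_values : List (Int × List Int)) :
    match_dict d_near_rad d_values = match_dict_alt d_near_rad d_values := by
  unfold match_dict match_dict_alt
  simp only [PySem.Dict.keys, List.foldl_map]
  congr 2
  funext myDict kv
  have hnd : ((dict_inverse (PySem.Dict.ofList d_values)).items.map Prod.fst).Nodup :=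
    nodup_keys_dict_inverse (PySem.Dict.ofList d_values)
  exact scan_eq_lookup kv.1 _ myDict hnd

-- ===== VERDICT (by name: the statement is the Claim_ definition above) =====
theorem match_dict_spec : Claim_equal_match_dict := by
  intro d_near_rad d_values _
  unfold Spec_match_dict
  exact match_dict_eq_alt d_near_rad d_values
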